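-- pv_equiv track=rewrite | github.com/Herrieson/HoneyGuard | scripts/build_attack_config.py | _pick_candidate_assets
-- ===== SOURCE A (Python) =====
-- from typing import Any, Dict, List, Literal, Optional, Tuple
--
-- def _pick_candidate_assets(paths: List[str], limit: int) -> List[str]:
--     scored: List[Tuple[int, str]] = []
--     allowed_prefixes = ("/etc/", "/var/", "/srv/", "/usr/", "/opt/", "/home/", "/tmp/")
--     for p in paths:
--         key = p.lower()
--         if not key.startswith(allowed_prefixes):
--             continue
--         score = 0
--         if any(x in key for x in ["id_rsa", "id_ed25519", ".pem", "private", "secret", "credentials", "token"]):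
--             score += 5
--         if any(x in key for x in [".env", "config", "kube", "aws", "vault", "ssh"]):
--             score += 4
--         if any(x in key for x in ["backup", "db", "sql", "customer", "payroll"]):
--             score += 3
--         if key.endswith((".env", ".pem", ".key", ".json", ".yaml", ".yml", ".txt")):
--             score += 1
--         if score > 0:
--             scored.append((score, p))
--
--     scored.sort(key=lambda x: (-x[0], x[1]))
--     picked: List[str] = []
--     seen_roots = set()
--     for _, path in scored:
--         root = path.split("/", 2)[1] if path.startswith("/") and "/" in path[1:] else ""
--         # Prefer spreading assets across multiple top-level roots.
--         if root and root not in seen_roots: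
--             picked.append(path)
--             seen_roots.add(root)
--         elif len(picked) < max(1, limit):
--             picked.append(path)
--         if len(picked) >= max(1, limit):
--             break
--     return picked
-- ===== SOURCE B (Python) =====
-- from typing import List, Tuple
--
-- _PREFIXES = ("/etc/", "/var/", "/srv/", "/usr/", "/opt/", "/home/", "/tmp/")
-- _SUFFIXES = (".env", ".pem", ".key", ".json", ".yaml", ".yml", ".txt")
-- _GROUPS: Tuple[Tuple[int, Tuple[str, ...]], ...] = (
--     (5, ("id_rsa", "id_ed25519", ".pem", "private", "secret", "credentials", "token")),
--     (4, (".env", "config", "kube", "aws", "vault", "ssh")),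
--     (3, ("backup", "db", "sql", "customer", "payroll")),
-- )
-- _MAX_SCORE = 13  # 5 + 4 + 3 + 1
--
-- def _score(p: str) -> int:
--     key = p.lower()
--     if not key.startswith(_PREFIXES):
--         return 0
--     s = sum(w for w, subs in _GROUPS if any(x in key for x in subs))
--     if key.endswith(_SUFFIXES):
--         s += 1
--     return s
--
-- def _pick_candidate_assets(paths: List[str], limit: int) -> List[str]:
--     # Bucket (counting) selection: scores are bounded by _MAX_SCORE, so instead of
--     # comparison-sorting all scored pairs we bin paths by score and walk the bins
--     # from highest score down, sorting only each bin's paths lexicographically.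
--     buckets = {}
--     for p in paths:
--         s = _score(p)
--         if s > 0:
--             buckets.setdefault(s, []).append(p)
--     out: List[str] = []
--     for s in range(_MAX_SCORE, 0, -1):
--         out.extend(sorted(buckets.get(s, [])))
--     return out[:max(1, limit)]
-- ===== Notes on version B (the rewrite author's own statement) =====
-- stated objective: alternative
-- what changed: B replaces A's comparison sort over all scored pairs plus the branching selection loop with dead seen_roots spreading logic by a bucket (counting) selection: scores are bounded by 13, so paths are binned by score in a dict, bins are walked from score 13 down with only each bin's paths sorted lexicographically, and the result is truncated to max(1, limit).
import Mathlib
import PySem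

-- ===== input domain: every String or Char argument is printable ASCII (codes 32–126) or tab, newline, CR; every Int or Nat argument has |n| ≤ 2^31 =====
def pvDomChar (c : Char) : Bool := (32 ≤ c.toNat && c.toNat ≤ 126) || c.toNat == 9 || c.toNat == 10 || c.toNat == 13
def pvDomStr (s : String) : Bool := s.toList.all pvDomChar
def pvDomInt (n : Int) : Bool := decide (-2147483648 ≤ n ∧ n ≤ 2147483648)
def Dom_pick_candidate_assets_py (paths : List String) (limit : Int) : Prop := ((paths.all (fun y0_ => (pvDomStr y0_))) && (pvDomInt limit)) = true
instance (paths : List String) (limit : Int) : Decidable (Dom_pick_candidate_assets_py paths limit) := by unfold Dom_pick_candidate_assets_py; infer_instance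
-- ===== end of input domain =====

-- B replaces A's comparison sort + dead seen_roots selection loop by a bucket (counting)
-- selection over the bounded score range 13..1, sorting only each bucket's paths: alternative.


-- ===== PORT A =====
-- the allowed_prefixes tuple; 'key.startswith(tuple)' is 'any' over this list (exact Python semantics)
def pvPrefixes : List String := ["/etc/", "/var/", "/srv/", "/usr/", "/opt/", "/home/", "/tmp/"]

-- root = path.split("/", 2)[1] if path.startswith("/") and "/" in path[1:] else ""
-- (the [1] index is always in range when the guard holds, so the getD defaults are totality padding only)
def pvRoot (path : String) : String :=
  if PySem.Str.startswith path "/" && PySem.Str.isIn "/" (PySem.Str.slice path (some 1) none) then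
    (((PySem.Str.splitMax? path "/" 2).getD []).getD 1 "")
  else ""

-- A's selection loop over the sorted list, with the 'break' once max(1, limit) are picked
def pvLoopA (k : Int) : List (Int × String) → List String → PySem.Set String → List String
  | [], picked, _ => picked
  | (_, path) :: rest, picked, seen =>
    let root := pvRoot path
    if root ≠ "" ∧ PySem.Set.contains seen root = false then
      let picked' := picked ++ [path]
      if (picked'.length : Int) ≥ k then picked' else pvLoopA k rest picked' (PySem.Set.add seen root)
    else if (picked.length : Int) < k then
      let picked' := picked ++ [path]
      if (picked'.length : Int) ≥ k then picked' else pvLoopA k rest picked' seen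
    else
      if (picked.length : Int) ≥ k then picked else pvLoopA k rest picked seen

def pick_candidate_assets_py (paths : List String) (limit : Int) : List String :=
  let scored : List (Int × String) := paths.foldl (fun acc p =>
    let key := PySem.Str.lower p
    if !(pvPrefixes.any (fun pre => PySem.Str.startswith key pre)) then acc
    else
      let score : Int := 0
      let score := if ["id_rsa", "id_ed25519", ".pem", "private", "secret", "credentials", "token"].any (fun x => PySem.Str.isIn x key) then score + 5 else score
      let score := if [".env", "config", "kube", "aws", "vault", "ssh"].any (fun x => PySem.Str.isIn x key) then score + 4 else score
      let score := if ["backup", "db", "sql", "customer", "payroll"].any (fun x => PySem.Str.isIn x key) then score + 3 else score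
      let score := if [".env", ".pem", ".key", ".json", ".yaml", ".yml", ".txt"].any (fun x => PySem.Str.endswith key x) then score + 1 else score
      if score > 0 then acc ++ [(score, p)] else acc) []
  let scored := PySem.List.sorted2 scored (fun x => -x.1) (fun x => x.2)
  pvLoopA (max 1 limit) scored [] PySem.Set.empty

-- ===== PORT B =====
def pvSuffixes : List String := [".env", ".pem", ".key", ".json", ".yaml", ".yml", ".txt"]
def pvGroups : List (Int × List String) :=
  [ (5, ["id_rsa", "id_ed25519", ".pem", "private", "secret", "credentials", "token"])
  , (4, [".env", "config", "kube", "aws", "vault", "ssh"])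
  , (3, ["backup", "db", "sql", "customer", "payroll"]) ]

def pvScoreB (p : String) : Int :=
  let key := PySem.Str.lower p
  if !(pvPrefixes.any (fun pre => PySem.Str.startswith key pre)) then 0
  else
    let s := ((pvGroups.filter (fun g => g.2.any (fun x => PySem.Str.isIn x key))).map (fun g => g.1)).sum
    let s := if pvSuffixes.any (fun x => PySem.Str.endswith key x) then s + 1 else s
    s

-- buckets.setdefault(s, []).append(p) = overwrite key s with its current list extended by p
def pick_candidate_assets_py_alt (paths : List String) (limit : Int) : List String :=
  let buckets : PySem.Dict Int (List String) := paths.foldl (fun d p =>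
    let s := pvScoreB p
    if s > 0 then PySem.Dict.insert d s (PySem.Dict.getD d s [] ++ [p]) else d) PySem.Dict.empty
  let out : List String := (PySem.List.pyRange 13 0 (-1)).foldl (fun acc s =>
    acc ++ PySem.List.sorted (PySem.Dict.getD buckets s []) (fun x => x)) []
  PySem.List.slice out none (some (max 1 limit))

-- ===== PRECONDITION & SPEC =====
def Spec_pick_candidate_assets_py (paths : List String) (limit : Int) (out : List String) : Prop := out = pick_candidate_assets_py_alt paths limit
instance (paths : List String) (limit : Int) (out : List String) : Decidable (Spec_pick_candidate_assets_py paths limit out) := by unfold Spec_pick_candidate_assets_py; infer_instance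

-- ===== CLAIM (what is proved, stated in full; the proofs are below) =====
def Claim_equal_pick_candidate_assets_py : Prop := ∀ (paths : List String) (limit : Int), Dom_pick_candidate_assets_py paths limit → Spec_pick_candidate_assets_py paths limit (pick_candidate_assets_py paths limit)

-- ===== LEMMAS AND PROOFS =====

-- A's selection loop, started below the cap, just takes the first k paths (every iteration
-- appends: of the two append branches one always fires while len(picked) < k).
theorem pvLoopA_eq_take (k : Int) (l : List (Int × String)) :
    ∀ (picked : List String) (seen : PySem.Set String), (picked.length : Int) < k →
      pvLoopA k l picked seen = picked ++ (l.map Prod.snd).take (k - picked.length).toNat := by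
  induction l with
  | nil => intro picked seen _; simp [pvLoopA]
  | cons hd rest ih =>
    intro picked seen hlt
    obtain ⟨s, path⟩ := hd
    by_cases hr : pvRoot path ≠ "" ∧ PySem.Set.contains seen (pvRoot path) = false
    · simp only [pvLoopA, if_pos hr]
      by_cases hk : ((picked ++ [path]).length : Int) ≥ k
      · rw [if_pos hk]
        have h1 : (k - picked.length).toNat = 1 := by simp at hk; omega
        simp [h1]
      · rw [if_neg hk]
        rw [ih (picked ++ [path]) _ (by simp at hk ⊢; omega)]
        have h1 : (k - picked.length).toNat = (k - (picked ++ [path]).length).toNat + 1 := by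
          simp at hk ⊢; omega
        simp [h1, List.take_succ_cons]
    · simp only [pvLoopA, if_neg hr, if_pos hlt]
      by_cases hk : ((picked ++ [path]).length : Int) ≥ k
      · rw [if_pos hk]
        have h1 : (k - picked.length).toNat = 1 := by simp at hk; omega
        simp [h1]
      · rw [if_neg hk]
        rw [ih (picked ++ [path]) _ (by simp at hk ⊢; omega)]
        have h1 : (k - picked.length).toNat = (k - (picked ++ [path]).length).toNat + 1 := by
          simp at hk ⊢; omega
        simp [h1, List.take_succ_cons]

-- A's scoring pass (sequential += increments, append) builds exactly the filterMap of the
-- table-summed score pvScoreB.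
theorem pvScored_eq (paths : List String) :
    paths.foldl (fun acc p =>
      let key := PySem.Str.lower p
      if !(pvPrefixes.any (fun pre => PySem.Str.startswith key pre)) then acc
      else
        let score : Int := 0
        let score := if ["id_rsa", "id_ed25519", ".pem", "private", "secret", "credentials", "token"].any (fun x => PySem.Str.isIn x key) then score + 5 else score
        let score := if [".env", "config", "kube", "aws", "vault", "ssh"].any (fun x => PySem.Str.isIn x key) then score + 4 else score
        let score := if ["backup", "db", "sql", "customer", "payroll"].any (fun x => PySem.Str.isIn x key) then score + 3 else score
        let score := if [".env", ".pem", ".key", ".json", ".yaml", ".yml", ".txt"].any (fun x => PySem.Str.endswith key x) then score + 1 else score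
        if score > 0 then acc ++ [(score, p)] else acc) []
    = paths.filterMap (fun p => let s := pvScoreB p; if s > 0 then some (s, p) else none) := by
  rw [PySem.List.foldl_congr_mem paths _
        (fun acc p => acc ++ ((fun p => let s := pvScoreB p; if s > 0 then some (s, p) else none) p).toList) [] ?hpt]
  case hpt =>
    intro acc q _
    simp only [pvScoreB, pvGroups, pvSuffixes, List.filter_cons, List.filter_nil]
    cases hpre : pvPrefixes.any (fun pre => PySem.Str.startswith (PySem.Str.lower q) pre)
    · simp
    · simp only [Bool.not_true, Bool.false_eq_true, if_false]
      generalize (["id_rsa", "id_ed25519", ".pem", "private", "secret", "credentials", "token"].any (fun x => PySem.Str.isIn x (PySem.Str.lower q))) = c1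
      generalize ([".env", "config", "kube", "aws", "vault", "ssh"].any (fun x => PySem.Str.isIn x (PySem.Str.lower q))) = c2
      generalize (["backup", "db", "sql", "customer", "payroll"].any (fun x => PySem.Str.isIn x (PySem.Str.lower q))) = c3
      generalize ([".env", ".pem", ".key", ".json", ".yaml", ".yml", ".txt"].any (fun x => PySem.Str.endswith (PySem.Str.lower q) x)) = c4
      cases c1 <;> cases c2 <;> cases c3 <;> cases c4 <;> norm_num
  rw [PySem.List.foldl_append_eq_flatMap]
  simp [List.filterMap_eq_flatMap_toList]

-- a positive pvScoreB is at most 13 (= 5 + 4 + 3 + 1)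
theorem pvScoreB_le (p : String) : pvScoreB p ≤ 13 := by
  unfold pvScoreB
  cases hpre : pvPrefixes.any (fun pre => PySem.Str.startswith (PySem.Str.lower p) pre)
  · simp only [hpre, Bool.not_false, if_true]; norm_num
  · simp only [hpre, Bool.not_true, Bool.false_eq_true, if_false, pvGroups, List.filter_cons,
      List.filter_nil]
    cases h1 : (["id_rsa", "id_ed25519", ".pem", "private", "secret", "credentials", "token"].any (fun x => PySem.Str.isIn x (PySem.Str.lower p))) <;>
    cases h2 : ([".env", "config", "kube", "aws", "vault", "ssh"].any (fun x => PySem.Str.isIn x (PySem.Str.lower p))) <;>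
    cases h3 : (["backup", "db", "sql", "customer", "payroll"].any (fun x => PySem.Str.isIn x (PySem.Str.lower p))) <;>
    cases h4 : (pvSuffixes.any (fun x => PySem.Str.endswith (PySem.Str.lower p) x)) <;>
    norm_num
theorem pv_sorted2_eq_sorted {α κ₁ κ₂ : Type} [LinearOrder κ₁] [LinearOrder κ₂]
    (xs : List α) (k1 : α → κ₁) (k2 : α → κ₂) :
    PySem.List.sorted2 xs k1 k2 = PySem.List.sorted xs (fun x => toLex (k1 x, k2 x)) := by
  unfold PySem.List.sorted2 PySem.List.sorted
  simp only [Bool.false_eq_true, if_false]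
  have hcmp : (fun a b => decide (k1 a < k1 b) || (!decide (k1 b < k1 a) && decide (k2 a < k2 b)))
      = (fun a b => decide ((toLex (k1 a, k2 a) : Lex (κ₁ × κ₂)) < toLex (k1 b, k2 b))) := by
    funext a b
    rw [Bool.eq_iff_iff]
    simp only [Bool.or_eq_true, Bool.and_eq_true, Bool.not_eq_true', decide_eq_true_eq,
      decide_eq_false_iff_not, Prod.Lex.toLex_lt_toLex]
    constructor
    · rintro (h | ⟨h1, h2⟩)
      · exact Or.inl h
      · rcases lt_or_ge (k1 a) (k1 b) with h3 | h3
        · exact Or.inl h3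
        · exact Or.inr ⟨le_antisymm (not_lt.mp h1) h3, h2⟩
    · rintro (h | ⟨h1, h2⟩)
      · exact Or.inl h
      · exact Or.inr ⟨by simp [h1], h2⟩
  rw [hcmp]
theorem pv_perm_fibers {α : Type} [DecidableEq α] (f : α → Int) (S : List Int) (hS : S.Nodup) :
    ∀ (xs : List α), (∀ t ∈ xs, f t ∈ S) →
      xs.Perm (S.flatMap fun s => xs.filter (fun t => f t == s)) := by
  intro xs
  induction xs with
  | nil => intro _; simp
  | cons x xs ih =>
    intro h
    have hx : f x ∈ S := h x (List.mem_cons_self)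
    obtain ⟨S₁, S₂, rfl⟩ := List.append_of_mem hx
    have hnd := hS
    rw [List.nodup_append] at hnd
    have hx1 : f x ∉ S₁ := fun hmem => hnd.2.2 _ hmem _ List.mem_cons_self rfl
    have hx2 : f x ∉ S₂ := (List.nodup_cons.mp hnd.2.1).1
    have hfilter : ∀ s : Int, s ≠ f x →
        (x :: xs).filter (fun t => f t == s) = xs.filter (fun t => f t == s) := by
      intro s hs
      have hb : (f x == s) = false := beq_eq_false_iff_ne.mpr (fun h' => hs h'.symm)
      simp [hb]
    have e1 : S₁.flatMap (fun s => (x :: xs).filter (fun t => f t == s))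
        = S₁.flatMap (fun s => xs.filter (fun t => f t == s)) :=
      List.flatMap_congr (fun s hs => hfilter s (fun h' => hx1 (h' ▸ hs)))
    have e2 : S₂.flatMap (fun s => (x :: xs).filter (fun t => f t == s))
        = S₂.flatMap (fun s => xs.filter (fun t => f t == s)) :=
      List.flatMap_congr (fun s hs => hfilter s (fun h' => hx2 (h' ▸ hs)))
    have emid : (x :: xs).filter (fun t => f t == (f x)) = x :: xs.filter (fun t => f t == (f x)) := by
      simp
    have ihp := ih (fun t ht => h t (List.mem_cons_of_mem _ ht))
    have goal2 : (x :: xs).Perm (S₁.flatMap (fun s => xs.filter (fun t => f t == s)) ++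
        (x :: (xs.filter (fun t => f t == f x) ++ S₂.flatMap (fun s => xs.filter (fun t => f t == s))))) := by
      refine (ihp.cons x).trans ?_
      rw [List.flatMap_append, List.flatMap_cons]
      simpa using List.perm_middle.symm
    rw [List.flatMap_append, List.flatMap_cons, e1, e2, emid]
    simpa using goal2
theorem pv_insertBy_map_snd (x : Int × String) (l : List (Int × String)) :
    (PySem.List.insertBy (fun a b => decide (a.2 < b.2)) x l).map Prod.snd
      = PySem.List.insertBy (fun a b => decide (a < b)) x.2 (l.map Prod.snd) := by
  induction l with
  | nil => simp [PySem.List.insertBy]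
  | cons y ys ih =>
    simp only [List.map_cons]
    simp only [PySem.List.insertBy, decide_eq_true_eq]
    split_ifs with h
    · simp
    · rw [List.map_cons, ih]

theorem pv_sorted_map_snd (l : List (Int × String)) :
    (PySem.List.sorted l (fun t => t.2)).map Prod.snd
      = PySem.List.sorted (l.map Prod.snd) (fun x => x) := by
  rw [PySem.List.sorted_eq_foldl_insertBy, PySem.List.sorted_eq_foldl_insertBy]
  suffices h : ∀ (acc : List (Int × String)),
      (l.foldl (fun acc x => PySem.List.insertBy (fun a b => decide (a.2 < b.2)) x acc) acc).map Prod.snd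
        = (l.map Prod.snd).foldl (fun acc x => PySem.List.insertBy (fun a b => decide (a < b)) x acc) (acc.map Prod.snd) by
    simpa using h []
  induction l with
  | nil => simp
  | cons y ys ih =>
    intro acc
    simp only [List.foldl_cons, List.map_cons]
    rw [ih, pv_insertBy_map_snd]
theorem pv_buckets_getD (l : List (Int × String)) :
    ∀ (d : PySem.Dict Int (List String)) (s : Int),
      PySem.Dict.getD (l.foldl (fun d t => PySem.Dict.insert d t.1 (PySem.Dict.getD d t.1 [] ++ [t.2])) d) s []
        = PySem.Dict.getD d s [] ++ (l.filter (fun t => t.1 == s)).map Prod.snd := by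
  induction l with
  | nil => intro d s; simp
  | cons t l ih =>
    intro d s
    rw [List.foldl_cons, ih, PySem.Dict.getD_insert, List.filter_cons]
    by_cases h : t.1 = s
    · simp [h]
    · have hb : (t.1 == s) = false := beq_eq_false_iff_ne.mpr h
      rw [if_neg (fun h' : s = t.1 => h h'.symm)]
      simp [hb]
theorem pv_sorted_eq_fibers (scored : List (Int × String))
    (hmem : ∀ t ∈ scored, 0 < t.1 ∧ t.1 ≤ 13) :
    PySem.List.sorted scored (fun t => (toLex (-t.1, t.2) : Lex (Int × String)))
      = ([13,12,11,10,9,8,7,6,5,4,3,2,1] : List Int).flatMap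
          (fun s => PySem.List.sorted (scored.filter (fun t => t.1 == s)) (fun t => t.2)) := by
  set S : List Int := [13,12,11,10,9,8,7,6,5,4,3,2,1] with hSdef
  set K : Int × String → Lex (Int × String) := fun t => toLex (-t.1, t.2) with hKdef
  set g : Int → List (Int × String) :=
    fun s => PySem.List.sorted (scored.filter (fun t => t.1 == s)) (fun t => t.2) with hgdef
  have hK : Function.Injective K := by
    intro a b h
    have h' : (-a.1, a.2) = (-b.1, b.2) := by
      simpa [hKdef] using h
    rw [Prod.ext_iff] at h'
    exact Prod.ext (by omega) h'.2
  have hg_mem : ∀ (s : Int) (a : Int × String), a ∈ g s → a.1 = s := by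
    intro s a ha
    rw [hgdef] at ha
    simp only at ha
    have hmemf : a ∈ scored.filter (fun t => t.1 == s) :=
      (PySem.List.sorted_perm (scored.filter (fun t => t.1 == s)) (fun t => t.2) false).mem_iff.mp ha
    simpa using (List.mem_filter.mp hmemf).2
  have hperm1 : scored.Perm (S.flatMap fun s => scored.filter (fun t => t.1 == s)) := by
    apply pv_perm_fibers Prod.fst S (by rw [hSdef]; decide)
    intro t ht
    have := hmem t ht
    rw [hSdef]
    simp only [List.mem_cons, List.not_mem_nil, or_false]
    omega
  have hperm2 : (S.flatMap fun s => scored.filter (fun t => t.1 == s)).Perm (S.flatMap g) := by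
    rw [List.flatMap_def, List.flatMap_def]
    apply List.Perm.flatten_congr
    rw [List.forall₂_map_left_iff, List.forall₂_map_right_iff]
    apply List.forall₂_same.mpr
    intro s _
    exact (PySem.List.sorted_perm _ _ _).symm
  have hp1 : List.Pairwise (fun a b => K a ≤ K b) (PySem.List.sorted scored K) :=
    PySem.List.sorted_pairwise scored K
  have hp2 : List.Pairwise (fun a b => K a ≤ K b) (S.flatMap g) := by
    rw [List.flatMap_def]
    apply List.pairwise_flatten.mpr
    refine ⟨?_, ?_⟩
    · intro l hl
      obtain ⟨s, _, rfl⟩ := List.mem_map.mp hl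
      have hpw : List.Pairwise (fun a b : Int × String => a.2 ≤ b.2) (g s) := by
        rw [hgdef]; exact PySem.List.sorted_pairwise _ _
      refine hpw.imp_of_mem ?_
      intro a b ha hb hab
      have ha1 := hg_mem s a ha
      have hb1 := hg_mem s b hb
      rw [hKdef]
      simp only [Prod.Lex.toLex_le_toLex]
      exact Or.inr ⟨by omega, hab⟩
    · rw [List.pairwise_map]
      have hSp : List.Pairwise (fun a b : Int => b < a) S := by rw [hSdef]; decide
      refine hSp.imp_of_mem ?_
      intro s₁ s₂ _ _ hlt x hx y hy
      have hx1 := hg_mem s₁ x hx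
      have hy1 := hg_mem s₂ y hy
      rw [hKdef]
      simp only [Prod.Lex.toLex_le_toLex]
      exact Or.inl (by omega)
  exact PySem.List.eq_of_perm_of_pairwise_le_of_injective K hK
    (((PySem.List.sorted_perm scored K false).trans hperm1).trans hperm2) hp1 hp2
-- the assembled equality, proved for all inputs (Dom is not needed)
theorem pick_candidate_assets_py_eq (paths : List String) (limit : Int) :
    pick_candidate_assets_py paths limit = pick_candidate_assets_py_alt paths limit := by
  simp only [pick_candidate_assets_py, pick_candidate_assets_py_alt]
  rw [pvScored_eq]
  set f : String → Option (Int × String) :=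
    fun p => let s := pvScoreB p; if s > 0 then some (s, p) else none with hf
  set scored := paths.filterMap f with hscored
  -- A side: the selection loop is take (max 1 limit)
  rw [pvLoopA_eq_take (max 1 limit) _ [] PySem.Set.empty (by simp)]
  -- B side: the bucket fold is the fold over the scored list
  have hbfold : paths.foldl (fun d p =>
      let s := pvScoreB p
      if s > 0 then PySem.Dict.insert d s (PySem.Dict.getD d s [] ++ [p]) else d) PySem.Dict.empty
      = scored.foldl (fun d t => PySem.Dict.insert d t.1 (PySem.Dict.getD d t.1 [] ++ [t.2]))
          PySem.Dict.empty := by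
    rw [hscored, List.foldl_filterMap]
    apply PySem.List.foldl_congr_mem
    intro d p _
    simp only [hf]
    by_cases h : pvScoreB p > 0
    · simp [h]
    · simp [h]
  rw [hbfold]
  have hmemS : ∀ t ∈ scored, 0 < t.1 ∧ t.1 ≤ 13 := by
    intro t ht
    obtain ⟨p, _, hfp⟩ := List.mem_filterMap.mp ht
    simp only [hf] at hfp
    by_cases h : pvScoreB p > 0
    · rw [if_pos h] at hfp
      obtain rfl := Option.some.inj hfp
      exact ⟨h, pvScoreB_le p⟩
    · rw [if_neg h] at hfp; exact absurd hfp (by simp)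
  have hrange : PySem.List.pyRange 13 0 (-1) = ([13,12,11,10,9,8,7,6,5,4,3,2,1] : List Int) := by
    decide
  rw [hrange, PySem.List.foldl_append_eq_flatMap, List.nil_append]
  have hbucket : ∀ s : Int,
      PySem.Dict.getD (scored.foldl (fun d t => PySem.Dict.insert d t.1 (PySem.Dict.getD d t.1 [] ++ [t.2])) PySem.Dict.empty) s []
        = (scored.filter (fun t => t.1 == s)).map Prod.snd := by
    intro s
    rw [pv_buckets_getD]
    simp [PySem.Dict.getD, PySem.Dict.get?, PySem.Dict.empty]
  have hchunks : ([13,12,11,10,9,8,7,6,5,4,3,2,1] : List Int).flatMap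
      (fun s => PySem.List.sorted (PySem.Dict.getD (scored.foldl (fun d t => PySem.Dict.insert d t.1 (PySem.Dict.getD d t.1 [] ++ [t.2])) PySem.Dict.empty) s []) (fun x => x))
      = (([13,12,11,10,9,8,7,6,5,4,3,2,1] : List Int).flatMap
          (fun s => PySem.List.sorted (scored.filter (fun t => t.1 == s)) (fun t => t.2))).map Prod.snd := by
    rw [List.map_flatMap]
    apply List.flatMap_congr
    intro s _
    rw [hbucket s, ← pv_sorted_map_snd]
  rw [hchunks, ← pv_sorted_eq_fibers scored hmemS]
  rw [pv_sorted2_eq_sorted scored (fun x => -x.1) (fun x => x.2)]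
  rw [PySem.List.slice_to _ (by omega)]
  simp

-- ===== VERDICT (by name: the statement is the Claim_ definition above) =====
theorem pick_candidate_assets_py_spec : Claim_equal_pick_candidate_assets_py := by
  intro paths limit _
  exact pick_candidate_assets_py_eq paths limit
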